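-- pv_equiv track=rewrite | github.com/MrGhastien/dorset-app-ca1 | sshkbase/views.py | isNicknameValid
-- ===== SOURCE A (Python) =====
-- def isNicknameValid(nickname):
--     if len(nickname) == 0 or str.isspace(nickname):
--         return False
--
--     validList = [c for c in "abcdefghijklmnopqrstuvwxyz0123456789-_"]
--     for c in nickname:
--         if c not in validList:
--             return False
--     return True
-- ===== SOURCE B (Python) =====
-- import re
--
-- def isNicknameValid(nickname):
--     return bool(re.fullmatch(r'[a-z0-9_-]+', nickname))
-- ===== Notes on version B (the rewrite author's own statement) =====
-- stated objective: idiomatic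
-- what changed: Replaced the explicit whitespace guard and per-character list-membership loop with a single regex fullmatch of [a-z0-9_-] repeated one-or-more times, which rejects the empty string and all-whitespace strings by itself.
import Mathlib
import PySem

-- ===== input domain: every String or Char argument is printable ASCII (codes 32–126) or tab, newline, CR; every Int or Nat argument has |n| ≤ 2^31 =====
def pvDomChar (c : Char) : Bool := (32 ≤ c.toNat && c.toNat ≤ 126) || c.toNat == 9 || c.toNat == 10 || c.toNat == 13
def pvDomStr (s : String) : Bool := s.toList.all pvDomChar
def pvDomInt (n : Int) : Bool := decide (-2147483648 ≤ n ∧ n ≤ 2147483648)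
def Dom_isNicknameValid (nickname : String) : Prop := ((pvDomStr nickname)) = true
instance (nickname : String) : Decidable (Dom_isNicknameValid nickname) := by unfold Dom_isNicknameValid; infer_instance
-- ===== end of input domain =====

-- ===== PORT A =====
-- B replaces A's whitespace guard and per-character list-membership loop with a single
-- regex full-match of [a-z0-9_-]+ (idiomatic); same return value on every input.
-- helper: A's "for c in nickname: if c not in validList: return False / return True"
def aNickLoop (validList : List Char) : List Char → Bool
  | [] => true
  | c :: cs => if !(validList.contains c) then false else aNickLoop validList cs

def isNicknameValid (nickname : String) : Bool :=
  if PySem.Str.len nickname == 0 || PySem.Str.strIsspace nickname then false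
  else
    let validList := "abcdefghijklmnopqrstuvwxyz0123456789-_".toList
    aNickLoop validList nickname.toList

-- ===== PORT B =====
-- Hand port of re.fullmatch(r'[a-z0-9_-]+', s): exact on all inputs — the class
-- [a-z0-9_-] is the predicate below (ranges a-z and 0-9, literal '_' and trailing '-'),
-- and '+' means the match succeeds iff s is nonempty and every character is in the class.
def nickClassChar (c : Char) : Bool :=
  ('a' ≤ c && c ≤ 'z') || ('0' ≤ c && c ≤ '9') || c == '_' || c == '-'

def isNicknameValid_alt (nickname : String) : Bool :=
  !nickname.toList.isEmpty && nickname.toList.all nickClassChar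

-- ===== PRECONDITION & SPEC =====
def Spec_isNicknameValid (nickname : String) (out : Bool) : Prop := out = isNicknameValid_alt nickname
instance (nickname : String) (out : Bool) : Decidable (Spec_isNicknameValid nickname out) := by unfold Spec_isNicknameValid; infer_instance

-- ===== CLAIM (what is proved, stated in full; the proofs are below) =====
def Claim_equal_isNicknameValid : Prop := ∀ (nickname : String), Dom_isNicknameValid nickname → Spec_isNicknameValid nickname (isNicknameValid nickname)

-- ===== LEMMAS AND PROOFS =====

lemma char_le_iff (a b : Char) : (a ≤ b) ↔ a.toNat ≤ b.toNat := by
  rw [Char.le_def, UInt32.le_iff_toNat_le]; rfl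

lemma nickClass_iff (c : Char) : nickClassChar c = true ↔
    ((97 ≤ c.toNat ∧ c.toNat ≤ 122) ∨ (48 ≤ c.toNat ∧ c.toNat ≤ 57) ∨ c.toNat = 95 ∨ c.toNat = 45) := by
  simp only [nickClassChar, Bool.or_eq_true, Bool.and_eq_true, char_le_iff, beq_iff_eq,
    Char.ext_iff, ← UInt32.toNat_inj, decide_eq_true_eq,
    show ∀ d : Char, d.val.toNat = d.toNat from fun _ => rfl,
    show ('a').toNat = 97 from rfl, show ('z').toNat = 122 from rfl,
    show ('0').toNat = 48 from rfl, show ('9').toNat = 57 from rfl,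
    show ('_').toNat = 95 from rfl, show ('-').toNat = 45 from rfl]
  tauto

lemma isspace_not_class (c : Char) (h : PySem.Chars.isspace c = true) :
    nickClassChar c = false := by
  simp only [PySem.Chars.isspace, Bool.or_eq_true, Bool.and_eq_true, decide_eq_true_eq] at h
  rw [Bool.eq_false_iff]
  intro hc
  rw [nickClass_iff] at hc
  omega

-- membership in A's validList agrees with B's character class, for every Char
lemma contains_eq_class (c : Char) :
    ("abcdefghijklmnopqrstuvwxyz0123456789-_".toList).contains c = nickClassChar c := by
  have hVL : "abcdefghijklmnopqrstuvwxyz0123456789-_".toList = ['a', 'b', 'c', 'd', 'e', 'f', 'g', 'h', 'i', 'j', 'k', 'l', 'm', 'n', 'o', 'p', 'q', 'r', 's', 't', 'u', 'v', 'w', 'x', 'y', 'z', '0', '1', '2', '3', '4', '5', '6', '7', '8', '9', '-', '_'] := rfl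
  rw [Bool.eq_iff_iff, List.contains_iff_mem, nickClass_iff]
  constructor
  · intro h
    rw [hVL] at h
    fin_cases h <;> decide
  · intro h
    have hc : c = Char.ofNat c.toNat := (Char.ofNat_toNat c).symm
    rcases h with ⟨h1, h2⟩ | ⟨h1, h2⟩ | h | h
    · rw [hc]
      have : c.toNat ∈ List.range' 97 26 := by
        rw [List.mem_range'_1]; omega
      revert this
      generalize c.toNat = n
      revert n
      decide
    · rw [hc]
      have : c.toNat ∈ List.range' 48 10 := by
        rw [List.mem_range'_1]; omega
      revert this
      generalize c.toNat = n
      revert n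
      decide
    · rw [hc, h]; decide
    · rw [hc, h]; decide

lemma aNickLoop_eq_all (vl l : List Char) :
    aNickLoop vl l = l.all (fun c => vl.contains c) := by
  induction l with
  | nil => rfl
  | cons c cs ih =>
    simp only [aNickLoop, List.all_cons]
    by_cases h : c ∈ vl <;> simp [h, ih]

-- ===== VERDICT (by name: the statement is the Claim_ definition above) =====
theorem isNicknameValid_spec : Claim_equal_isNicknameValid := by
  intro nickname _
  unfold Spec_isNicknameValid isNicknameValid isNicknameValid_alt
  simp only [PySem.Str.len, PySem.Str.strIsspace, PySem.Chars.strIsspace]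
  rcases hl : nickname.toList with _ | ⟨c, cs⟩
  · simp
  · by_cases hs : (c :: cs).all PySem.Chars.isspace = true
    · have hc : nickClassChar c = false :=
        isspace_not_class c (List.all_eq_true.mp hs c (by simp))
      simp [hs, List.all_cons, hc]
    · have hfun : (fun d => (("abcdefghijklmnopqrstuvwxyz0123456789-_".toList).contains d))
          = nickClassChar := funext contains_eq_class
      rw [if_neg (by simp [hs]; omega)]
      rw [aNickLoop_eq_all, hfun]
      simp
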